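-- pv_equiv track=rewrite | github.com/OskarBreach/advent-of-code-2018 | day06.py | find_closest_coordinate
-- ===== SOURCE A (Python) =====
-- def distance(coordinate1, coordinate2):
--     return abs(coordinate1[0] - coordinate2[0]) + abs(coordinate1[1] - coordinate2[1])
--
-- def find_closest_coordinate(point, coordinates):
--     coordinate_distance = {}
--     for coordinate in coordinates:
--         coordinate_distance[coordinate] = distance(point, coordinate)
--
--     closest_points = [k for k,v in coordinate_distance.items()
--                       if v == coordinate_distance[min(coordinate_distance, key=coordinate_distance.get)]]
--     if len(closest_points) == 1:
--         return closest_points[0]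
--
--     return None
-- ===== SOURCE B (Python) =====
-- def find_closest_coordinate(point, coordinates):
--     best = None
--     best_d = None
--     tie = False
--     for c in dict.fromkeys(coordinates):
--         d = abs(point[0] - c[0]) + abs(point[1] - c[1])
--         if best_d is None or d < best_d:
--             best, best_d, tie = c, d, False
--         elif d == best_d:
--             tie = True
--     return None if tie else best
-- ===== Notes on version B (the rewrite author's own statement) =====
-- stated objective: faster
-- what changed: A builds a coordinate->distance dict and then, for every entry, recomputes min(dict, key=dict.get) inside a comprehension (a linear scan per entry); B dedupes the coordinates once and keeps a running minimum with a tie flag in a single pass.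
import Mathlib
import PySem

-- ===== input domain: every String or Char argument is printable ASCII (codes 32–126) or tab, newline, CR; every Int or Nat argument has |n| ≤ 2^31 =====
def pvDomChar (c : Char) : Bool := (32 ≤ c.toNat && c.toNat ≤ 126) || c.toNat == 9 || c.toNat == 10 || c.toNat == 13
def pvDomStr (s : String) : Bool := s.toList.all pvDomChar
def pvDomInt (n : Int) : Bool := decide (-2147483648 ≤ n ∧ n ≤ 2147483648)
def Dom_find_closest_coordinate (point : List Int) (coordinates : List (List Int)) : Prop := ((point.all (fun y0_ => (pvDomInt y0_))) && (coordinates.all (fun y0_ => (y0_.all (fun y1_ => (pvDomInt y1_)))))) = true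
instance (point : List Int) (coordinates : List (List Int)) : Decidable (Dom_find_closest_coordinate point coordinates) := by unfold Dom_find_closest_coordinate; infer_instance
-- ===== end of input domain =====

-- B replaces A's per-entry recomputation of min(dict, key=dict.get) (quadratic) by one
-- deduplicating pass that keeps a running minimum and a tie flag (objective: faster).

-- ===== PORT A =====
-- helper 'distance' of A; indices 0/1 are total (pyGetD) — exact under Pre_ (lengths ≥ 2)
def pvDistA (coordinate1 coordinate2 : List Int) : Int :=
  |PySem.List.pyGetD coordinate1 0 0 - PySem.List.pyGetD coordinate2 0 0| +
  |PySem.List.pyGetD coordinate1 1 0 - PySem.List.pyGetD coordinate2 1 0|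

def find_closest_coordinate (point : List Int) (coordinates : List (List Int)) : Option (List Int) :=
  let coordinate_distance : PySem.Dict (List Int) Int :=
    coordinates.foldl (fun d coordinate => d.insert coordinate (pvDistA point coordinate))
      PySem.Dict.empty
  -- min(coordinate_distance, key=coordinate_distance.get), total form (getD []):
  -- when the dict is empty the comprehension below is vacuous and Python never evaluates min
  let argmin : List Int :=
    (PySem.List.min? coordinate_distance.keys
      (fun k => coordinate_distance.getD k 0)).getD []
  let closest_points : List (List Int) :=
    (coordinate_distance.items.filter
      (fun kv => kv.2 == coordinate_distance.getD argmin 0)).map Prod.fst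
  if closest_points.length = 1 then closest_points.head? else none

-- ===== PORT B =====
-- B's loop body: update (best, best_d, tie) with coordinate c
def pvStepB (point : List Int) (s : Option (List Int) × Option Int × Bool) (c : List Int) :
    Option (List Int) × Option Int × Bool :=
  let d : Int :=
    |PySem.List.pyGetD point 0 0 - PySem.List.pyGetD c 0 0| +
    |PySem.List.pyGetD point 1 0 - PySem.List.pyGetD c 1 0|
  match s.2.1 with
  | none => (some c, some d, false)
  | some bd =>
    if d < bd then (some c, some d, false)
    else if d == bd then (s.1, some bd, true)
    else s

def find_closest_coordinate_alt (point : List Int) (coordinates : List (List Int)) : Option (List Int) :=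
  let st := (PySem.List.dedup coordinates).foldl (pvStepB point) (none, none, false)
  if st.2.2 then none else st.1

-- ===== PRECONDITION & SPEC =====
-- Pre_ excludes exactly the inputs where Python A raises IndexError: some coordinate of
-- length < 2, or a nonempty coordinate list with a point of length < 2.
def Pre_find_closest_coordinate (point : List Int) (coordinates : List (List Int)) : Prop :=
  (coordinates = [] ∨ 2 ≤ point.length) ∧ ∀ c ∈ coordinates, 2 ≤ c.length
instance (point : List Int) (coordinates : List (List Int)) : Decidable (Pre_find_closest_coordinate point coordinates) := by unfold Pre_find_closest_coordinate; infer_instance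

def pvWitness_find_closest_coordinate : List Int × List (List Int) := ([0, 0], [[1, 2], [3, 4]])

def Spec_find_closest_coordinate (point : List Int) (coordinates : List (List Int)) (out : Option (List Int)) : Prop := out = find_closest_coordinate_alt point coordinates
instance (point : List Int) (coordinates : List (List Int)) (out : Option (List Int)) : Decidable (Spec_find_closest_coordinate point coordinates out) := by unfold Spec_find_closest_coordinate; infer_instance

-- ===== CLAIM (what is proved, stated in full; the proofs are below) =====
def Claim_equal_find_closest_coordinate : Prop := ∀ (point : List Int) (coordinates : List (List Int)), Dom_find_closest_coordinate point coordinates → Pre_find_closest_coordinate point coordinates → Spec_find_closest_coordinate point coordinates (find_closest_coordinate point coordinates)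

-- ===== LEMMAS AND PROOFS =====

-- proof-side abstraction of B's loop body: pvStepB point = pvStep0 (pvDistA point)
def pvStep0 (f : List Int → Int) (s : Option (List Int) × Option Int × Bool) (c : List Int) :
    Option (List Int) × Option Int × Bool :=
  let d := f c
  match s.2.1 with
  | none => (some c, some d, false)
  | some bd =>
    if d < bd then (some c, some d, false)
    else if d == bd then (s.1, some bd, true)
    else s

theorem pvStepB_eq_step0 (point : List Int) : pvStepB point = pvStep0 (pvDistA point) := rfl

-- the dict-building fold of A is the set-building fold paired with the distance
theorem pv_dict_fold_items (f : List Int → Int) (xs : List (List Int)) :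
    ∀ (L : List (List Int)),
    (xs.foldl (fun d c => d.insert c (f c)) (PySem.Dict.mk (L.map (fun c => (c, f c))))).items
      = (xs.foldl PySem.Set.add L).map (fun c => (c, f c)) := by
  induction xs with
  | nil => intro L; simp
  | cons c xs ih =>
    intro L
    by_cases hc : c ∈ L
    · have hcontains : (PySem.Dict.mk (L.map (fun c => (c, f c)))).contains c = true := by
        simp only [PySem.Dict.contains, List.any_eq_true]
        refine ⟨(c, f c), ?_, by simp⟩
        exact List.mem_map_of_mem hc
      have hins : (PySem.Dict.mk (L.map (fun c => (c, f c)))).insert c (f c)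
          = PySem.Dict.mk (L.map (fun c => (c, f c))) := by
        simp only [PySem.Dict.insert, hcontains, if_pos]
        congr 1
        rw [List.map_map]
        apply List.map_congr_left
        intro a _
        by_cases hac : a = c
        · subst hac; simp
        · simp [Function.comp, hac]
      have hadd : PySem.Set.add L c = L := by
        simp [PySem.Set.add, PySem.Set.contains, List.contains_eq_mem, hc]
      simp only [List.foldl_cons, hins, hadd, ih]
    · have hcontains : (PySem.Dict.mk (L.map (fun c => (c, f c)))).contains c = false := by
        simp [PySem.Dict.contains]
        intro a ha hac
        exact hc (hac ▸ ha)
      have hins : (PySem.Dict.mk (L.map (fun c => (c, f c)))).insert c (f c)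
          = PySem.Dict.mk ((L ++ [c]).map (fun c => (c, f c))) := by
        simp [PySem.Dict.insert, hcontains]
      have hadd : PySem.Set.add L c = L ++ [c] := by
        simp [PySem.Set.add, PySem.Set.contains, List.contains_eq_mem, hc]
      simp only [List.foldl_cons, hins, hadd, ih]

-- looking up a member of the paired list returns its value
theorem pv_getD_pairs (f : List Int → Int) :
    ∀ (L : List (List Int)) (k : List Int), k ∈ L →
    (PySem.Dict.mk (L.map (fun c => (c, f c)))).getD k 0 = f k := by
  intro L
  induction L with
  | nil => intro k hk; cases hk
  | cons a L ih =>
    intro k hk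
    by_cases hak : a = k
    · subst hak
      simp [PySem.Dict.getD, PySem.Dict.get?_mk_cons]
    · have hk' : k ∈ L := by
        rcases List.mem_cons.mp hk with h | h
        · exact absurd h.symm hak
        · exact h
      have := ih k hk'
      simp only [PySem.Dict.getD] at this ⊢
      simp only [List.map_cons, PySem.Dict.get?_mk_cons]
      rw [if_neg (by simp [hak])]
      exact this

-- proof-side copy of min?'s fold step, and min? as a fold of it
def pvMinStep (f : List Int → Int) (acc : Option (List Int)) (x : List Int) : Option (List Int) :=
  match acc with
  | none => some x
  | some m => if f x < f m then some x else some m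

theorem pv_min?_eq (f : List Int → Int) (L : List (List Int)) :
    PySem.List.min? L f = L.foldl (pvMinStep f) none := by
  simp only [PySem.List.min?]
  congr 1
  funext acc x
  cases acc <;> rfl

-- min? only looks at the key function on members (and on a member-accumulator)
theorem pv_min?_foldl_congr (g h : List Int → Int) :
    ∀ (L : List (List Int)) (acc : Option (List Int)),
      (∀ x ∈ L, g x = h x) → (∀ a, acc = some a → g a = h a) →
      L.foldl (pvMinStep g) acc = L.foldl (pvMinStep h) acc := by
  intro L
  induction L with
  | nil => intro acc _ _; rfl
  | cons x L ih =>
    intro acc hgh hacc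
    have hx : g x = h x := hgh x (by simp)
    have hgh' : ∀ y ∈ L, g y = h y := fun y hy => hgh y (List.mem_cons_of_mem _ hy)
    simp only [List.foldl_cons]
    cases acc with
    | none =>
      exact ih (some x) hgh' (by intro a ha; cases ha; exact hx)
    | some m =>
      have hm : g m = h m := hacc m rfl
      have e1 : pvMinStep g (some m) x = if h x < h m then some x else some m := by
        simp only [pvMinStep]; rw [hx, hm]
      have e2 : pvMinStep h (some m) x = if h x < h m then some x else some m := rfl
      rw [e1, e2]
      by_cases hlt : h x < h m
      · simp only [if_pos hlt]
        exact ih (some x) hgh' (by intro a ha; cases ha; exact hx)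
      · simp only [if_neg hlt]
        exact ih (some m) hgh' (by intro a ha; cases ha; exact hm)

theorem pv_min?_congr (g h : List Int → Int) (L : List (List Int))
    (hgh : ∀ x ∈ L, g x = h x) :
    PySem.List.min? L g = PySem.List.min? L h := by
  rw [pv_min?_eq, pv_min?_eq]
  exact pv_min?_foldl_congr g h L none hgh (by intro a ha; cases ha)

-- characterization of the running-minimum loop on a list (used for the deduped list)
theorem pv_core (f : List Int → Int) (L : List (List Int)) (hL : L ≠ []) :
    ∃ m, PySem.List.min? L f = some m ∧
      (L.filter (fun c => f c == f m)).head? = some m ∧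
      L.foldl (pvStep0 f) (none, none, false)
        = (some m, some (f m), decide (2 ≤ (L.filter (fun c => f c == f m)).length)) := by
  induction L using List.reverseRecOn with
  | nil => exact absurd rfl hL
  | append_singleton L c ih =>
    by_cases hLnil : L = []
    · subst hLnil
      refine ⟨c, ?_, ?_, ?_⟩
      · simp [PySem.List.min?]
      · simp
      · simp [pvStep0]
    · obtain ⟨m, hmin, hhead, hfold⟩ := ih hLnil
      have hmin' : L.foldl (pvMinStep f) none = some m := by
        rw [← pv_min?_eq]; exact hmin
      have hminmem : ∀ y ∈ L, f m ≤ f y := PySem.List.min?_isMin hmin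
      have hknil : L.filter (fun c => f c == f m) ≠ [] := by
        intro h; rw [h] at hhead; cases hhead
      have hmin_app : PySem.List.min? (L ++ [c]) f
          = if f c < f m then some c else some m := by
        rw [pv_min?_eq, List.foldl_append, hmin']
        rfl
      have hfold_app : (L ++ [c]).foldl (pvStep0 f) (none, none, false)
          = pvStep0 f (some m, some (f m),
              decide (2 ≤ (L.filter (fun c => f c == f m)).length)) c := by
        rw [List.foldl_append, hfold]; rfl
      by_cases h1 : f c < f m
      · refine ⟨c, ?_, ?_, ?_⟩
        · rw [hmin_app, if_pos h1]
        · have hLfilter : L.filter (fun x => f x == f c) = [] := by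
            apply List.filter_eq_nil_iff.mpr
            intro y hy
            have : f c < f y := lt_of_lt_of_le h1 (hminmem y hy)
            simp [(ne_of_lt this).symm]
          rw [List.filter_append, hLfilter]
          simp
        · rw [hfold_app]
          have hLfilter : L.filter (fun x => f x == f c) = [] := by
            apply List.filter_eq_nil_iff.mpr
            intro y hy
            have : f c < f y := lt_of_lt_of_le h1 (hminmem y hy)
            simp [(ne_of_lt this).symm]
          simp [pvStep0, h1, List.filter_append, hLfilter]
      · by_cases h2 : f c = f m
        · refine ⟨m, ?_, ?_, ?_⟩
          · rw [hmin_app, if_neg h1]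
          · rw [List.filter_append]
            rw [List.head?_append, hhead]
            rfl
          · rw [hfold_app]
            have h1len : 1 ≤ (L.filter (fun c => f c == f m)).length :=
              List.length_pos_iff.mpr hknil
            have hfc : (f c == f m) = true := by simp [h2]
            have hstep : pvStep0 f (some m, some (f m),
                decide (2 ≤ (L.filter (fun c => f c == f m)).length)) c
                = (some m, some (f m), true) := by
              simp [pvStep0, h2]
            rw [hstep, List.filter_append]
            simp only [List.filter_cons, hfc, List.filter_nil, List.length_append]
            have hge : 2 ≤ (L.filter (fun c => f c == f m)).length + 1 := by omega
            simp [hge]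
        · refine ⟨m, ?_, ?_, ?_⟩
          · rw [hmin_app, if_neg h1]
          · rw [List.filter_append]
            have hfc : (f c == f m) = false := by simp [h2]
            simp only [List.filter_cons, hfc, List.filter_nil]
            rw [List.head?_append, hhead]
            rfl
          · rw [hfold_app]
            have hfc : (f c == f m) = false := by simp [h2]
            simp [pvStep0, h1, hfc, List.filter_append]

-- ===== VERDICT (by name: the statement is the Claim_ definition above) =====
theorem find_closest_coordinate_spec : Claim_equal_find_closest_coordinate := by
  intro point coordinates _ _
  show find_closest_coordinate point coordinates = find_closest_coordinate_alt point coordinates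
  set f : List Int → Int := pvDistA point with hf
  set S : List (List Int) := PySem.Set.ofList coordinates with hS
  -- A's dict, reduced
  have hitems : (coordinates.foldl
      (fun d c => d.insert c (f c)) PySem.Dict.empty).items
      = S.map (fun c => (c, f c)) := by
    have := pv_dict_fold_items f coordinates []
    simpa [PySem.Dict.empty, PySem.Set.ofList] using this
  set cd : PySem.Dict (List Int) Int :=
    coordinates.foldl (fun d c => d.insert c (f c)) PySem.Dict.empty with hcd
  have hkeys : cd.keys = S := by
    simp only [PySem.Dict.keys, hitems, List.map_map]
    have hid : ((fun x : List Int × Int => x.1) ∘ fun c => (c, f c)) = id := rfl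
    rw [hid, List.map_id]
  have hgetD : ∀ k ∈ S, cd.getD k 0 = f k := by
    intro k hk
    have : cd = PySem.Dict.mk (S.map (fun c => (c, f c))) := by
      cases hcde : cd with
      | mk its => simp only [hcde] at hitems; simp [hitems]
    rw [this]
    exact pv_getD_pairs f S k hk
  have hminkey : PySem.List.min? cd.keys (fun k => cd.getD k 0) = PySem.List.min? S f := by
    rw [hkeys]
    exact pv_min?_congr _ f S hgetD
  by_cases hSnil : S = []
  · -- empty coordinates (up to dedup S = [] forces coordinates = [])
    have hcnil : coordinates = [] := by
      cases coordinates with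
      | nil => rfl
      | cons a t =>
        exfalso
        have : a ∈ S := (PySem.Set.mem_ofList _ a).mpr (by simp)
        rw [hSnil] at this; cases this
    subst hcnil
    rfl
  · obtain ⟨m, hmin, hhead, hfold⟩ := pv_core f S hSnil
    have hmS : m ∈ S := PySem.List.min?_mem hmin
    -- A's side
    have hA : find_closest_coordinate point coordinates
        = (if (S.filter (fun c => f c == f m)).length = 1
           then (S.filter (fun c => f c == f m)).head? else none) := by
      show (if _ then _ else _) = _
      have hfilter :
          ((cd.items.filter
            (fun kv => kv.2 == cd.getD
              ((PySem.List.min? cd.keys (fun k => cd.getD k 0)).getD []) 0)).map Prod.fst)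
          = S.filter (fun c => f c == f m) := by
        rw [hminkey, hmin]
        simp only [Option.getD_some]
        rw [hgetD m hmS, hitems, List.filter_map, List.map_map]
        have h1 : (S.filter ((fun (kv : List Int × Int) => kv.2 == f m) ∘ fun c => (c, f c)))
            = S.filter (fun c => f c == f m) := rfl
        rw [h1]
        have hid : (Prod.fst ∘ fun c : List Int => (c, f c)) = id := rfl
        rw [hid, List.map_id]
      rw [hfilter]
    -- B's side
    have hB : find_closest_coordinate_alt point coordinates
        = (if 2 ≤ (S.filter (fun c => f c == f m)).length then none else some m) := by
      show (if _ then _ else _) = _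
      rw [PySem.List.dedup_eq_ofList, ← hS, pvStepB_eq_step0, ← hf, hfold]
      by_cases h2 : 2 ≤ (S.filter (fun c => f c == f m)).length
      · simp [h2]
      · simp [h2]
    rw [hA, hB]
    have h1len : 1 ≤ (S.filter (fun c => f c == f m)).length := by
      apply List.length_pos_iff.mpr
      intro h; rw [h] at hhead; cases hhead
    by_cases hone : (S.filter (fun c => f c == f m)).length = 1
    · rw [if_pos hone, if_neg (by omega), hhead]
    · rw [if_neg hone, if_pos (by omega)]
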